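-- pv_equiv track=rewrite | github.com/roboticsystem/embedded-systems-grad-course | scripts/fix_formatting.py | fix_math_blocks
-- ===== SOURCE A (Python) =====
-- def fix_math_blocks(lines):
--     """Split $$ ... $$ on single line into three lines."""
--     new_lines = []
--     i = 0
--     changes = 0
--     while i < len(lines):
--         ln = lines[i]
--         stripped = ln.strip()
--         # Check if inside fence
--         fence_count = sum(1 for j in range(i) if lines[j].strip().startswith('```'))
--         if fence_count % 2 == 1:
--             new_lines.append(ln)
--             i += 1
--             continue
--         # Single line $$ ... $$ (both open and close on same line)
--         if stripped.startswith('$$') and stripped.endswith('$$') and len(stripped) > 4: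
--             content = stripped[2:-2].strip()
--             indent = ln[:len(ln) - len(ln.lstrip())]
--             new_lines.append(indent + '$$\n')
--             new_lines.append(indent + content + '\n')
--             new_lines.append(indent + '$$\n')
--             changes += 1
--             i += 1
--             continue
--         new_lines.append(ln)
--         i += 1
--     return new_lines, changes
-- ===== SOURCE B (Python) =====
-- def fix_math_blocks(lines):
--     """Split $$ ... $$ on single line into three lines (one pass, running fence counter)."""
--     new_lines = []
--     changes = 0
--     fences = 0
--     for ln in lines:
--         stripped = ln.strip()
--         if (fences % 2 == 0 and stripped.startswith('$$')
--                 and stripped.endswith('$$') and len(stripped) > 4):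
--             content = stripped[2:-2].strip()
--             indent = ln[:len(ln) - len(ln.lstrip())]
--             new_lines.extend([indent + '$$\n', indent + content + '\n', indent + '$$\n'])
--             changes += 1
--         else:
--             new_lines.append(ln)
--         if stripped.startswith('```'):
--             fences += 1
--     return new_lines, changes
-- ===== Notes on version B (the rewrite author's own statement) =====
-- stated objective: faster
-- what changed: Replaces the per-line rescan of all previous lines for ``` fences with a single pass that maintains a running fence counter.
import Mathlib
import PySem

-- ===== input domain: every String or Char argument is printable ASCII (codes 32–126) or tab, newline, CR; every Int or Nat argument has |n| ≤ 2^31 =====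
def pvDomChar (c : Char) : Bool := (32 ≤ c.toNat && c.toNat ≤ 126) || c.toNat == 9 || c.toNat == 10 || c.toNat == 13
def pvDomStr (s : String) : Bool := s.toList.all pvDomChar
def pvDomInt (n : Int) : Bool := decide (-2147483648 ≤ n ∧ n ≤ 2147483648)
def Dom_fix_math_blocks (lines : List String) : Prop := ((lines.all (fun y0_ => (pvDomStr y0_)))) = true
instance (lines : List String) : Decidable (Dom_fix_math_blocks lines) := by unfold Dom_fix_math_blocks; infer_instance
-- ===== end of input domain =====

-- B changes only the fence bookkeeping: a single pass with a running ``` counter instead of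
-- rescanning all previous lines on every iteration.

-- ===== PORT A =====
-- shared per-line transformation: the body of the "$$ ... $$ on one line" branch,
-- identical text in both Pythons (some [three lines] if the branch fires, none otherwise)
def pvMathSplit (ln : String) : Option (List String) :=
  let stripped := PySem.Str.strip ln
  if PySem.Str.startswith stripped "$$" && PySem.Str.endswith stripped "$$"
      && decide (4 < PySem.Str.len stripped) then
    let content := PySem.Str.strip (PySem.Str.slice stripped (some 2) (some (-2)))
    let indent := PySem.Str.slice ln none (some (PySem.Str.len ln - PySem.Str.len (PySem.Str.lstrip ln)))
    some [indent ++ "$$\n", indent ++ content ++ "\n", indent ++ "$$\n"]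
  else none

-- lines[j].strip().startswith('```')
def pvIsFence (s : String) : Bool := PySem.Str.startswith (PySem.Str.strip s) "```"

-- the while loop of A: the index i is represented by the split prev/rest of lines
-- (prev = lines[:i], rest = lines[i:]); the fence count is recomputed over the whole
-- prefix on every iteration, exactly as A's 'sum(1 for j in range(i) …)' does
def pvLoopA (prev rest new_lines : List String) (changes : Int) : List String × Int :=
  match rest with
  | [] => (new_lines, changes)
  | ln :: rest' =>
    let fence_count := prev.countP pvIsFence
    if fence_count % 2 = 1 then
      pvLoopA (prev ++ [ln]) rest' (new_lines ++ [ln]) changes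
    else
      match pvMathSplit ln with
      | some ls => pvLoopA (prev ++ [ln]) rest' (new_lines ++ ls) (changes + 1)
      | none => pvLoopA (prev ++ [ln]) rest' (new_lines ++ [ln]) changes

def fix_math_blocks (lines : List String) : List String × Int :=
  pvLoopA [] lines [] 0

-- ===== PORT B =====
-- one fold over the lines; state = (new_lines, changes, running fence counter)
def pvStepB (st : List String × Int × Nat) (ln : String) : List String × Int × Nat :=
  let stripped := PySem.Str.strip ln
  let out :=
    if st.2.2 % 2 = 0 then
      match pvMathSplit ln with
      | some ls => (st.1 ++ ls, st.2.1 + 1)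
      | none => (st.1 ++ [ln], st.2.1)
    else (st.1 ++ [ln], st.2.1)
  (out.1, out.2, if PySem.Str.startswith stripped "```" then st.2.2 + 1 else st.2.2)

def fix_math_blocks_alt (lines : List String) : List String × Int :=
  let r := lines.foldl pvStepB ([], 0, 0)
  (r.1, r.2.1)

-- ===== PRECONDITION & SPEC =====
def Spec_fix_math_blocks (lines : List String) (out : List String × Int) : Prop := out = fix_math_blocks_alt lines
instance (lines : List String) (out : List String × Int) : Decidable (Spec_fix_math_blocks lines out) := by unfold Spec_fix_math_blocks; infer_instance

-- ===== CLAIM (what is proved, stated in full; the proofs are below) =====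
def Claim_equal_fix_math_blocks : Prop := ∀ (lines : List String), Dom_fix_math_blocks lines → Spec_fix_math_blocks lines (fix_math_blocks lines)

-- ===== LEMMAS AND PROOFS =====

-- A's loop, with prefix prev already passed, equals B's fold over the remaining lines
-- seeded with the fence count of prev
lemma pvLoopA_eq_foldl (rest : List String) : ∀ (prev acc : List String) (ch : Int),
    pvLoopA prev rest acc ch =
      (let r := rest.foldl pvStepB (acc, ch, prev.countP pvIsFence)
       (r.1, r.2.1)) := by
  induction rest with
  | nil => intro prev acc ch; rfl
  | cons ln rest' ih =>
    intro prev acc ch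
    have hcnt : (prev ++ [ln]).countP pvIsFence =
        (if PySem.Str.startswith (PySem.Str.strip ln) "```"
          then prev.countP pvIsFence + 1 else prev.countP pvIsFence) := by
      rw [List.countP_append]
      unfold pvIsFence
      split <;> simp_all
    rw [List.foldl_cons]
    show pvLoopA prev (ln :: rest') acc ch =
      (let r := rest'.foldl pvStepB (pvStepB (acc, ch, prev.countP pvIsFence) ln)
       (r.1, r.2.1))
    rw [pvLoopA]
    by_cases hpar : prev.countP pvIsFence % 2 = 1
    · have hpar0 : ¬ prev.countP pvIsFence % 2 = 0 := by omega
      simp only [hpar, if_true, ih, hcnt]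
      simp [pvStepB, hpar0]
    · have hpar0 : prev.countP pvIsFence % 2 = 0 := by omega
      simp only [hpar, if_false]
      cases hms : pvMathSplit ln with
      | some ls =>
        simp only [ih, hcnt]
        simp [pvStepB, hpar0, hms]
      | none =>
        simp only [ih, hcnt]
        simp [pvStepB, hpar0, hms]

-- ===== VERDICT (by name: the statement is the Claim_ definition above) =====
theorem fix_math_blocks_spec : Claim_equal_fix_math_blocks := by
  intro lines _
  unfold Spec_fix_math_blocks fix_math_blocks fix_math_blocks_alt
  rw [pvLoopA_eq_foldl lines [] [] 0]
  rfl
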